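-- pv_equiv track=rewrite | github.com/Kawser-nerd/CLCDSA | Source Codes/AtCoder/agc016/C/2558259.py | get_1d
-- ===== SOURCE A (Python) =====
-- def get_1d(H, h):
--     ret = [0] * (H + 1)
--     for s in range(h):
--         for x, i in enumerate(range(s, H, h)):
--             ret[i] = -x
--     for x, i in enumerate(range(H, 0, -h)):
--         ret[i] = x + 1
--     return [x1 - x0 for x0, x1 in zip(ret, ret[1:])]
-- ===== SOURCE B (Python) =====
-- def get_1d(H, h):
--     # Pointwise closed form: no array, no mutation. val(i) is the height profile
--     # (overwrite positions H, H-h, ... get their rank from the top, every other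
--     # position i < H gets -(i // h)); the answer is its discrete derivative.
--     def val(i):
--         if 0 < i and (H - i) % h == 0:
--             return (H - i) // h + 1
--         return -(i // h) if i < H else 0
--     return [val(i + 1) - val(i) for i in range(H)]
-- ===== Notes on version B (the rewrite author's own statement) =====
-- stated objective: alternative
-- what changed: A builds an H+1 array by three destructive passes (nested residue-class fill, reversed-stride overwrite, pairwise differencing); B builds nothing: it defines the profile pointwise as a pure closed-form function val(i) (overwrite positions by divisibility test, others by -(i//h)) and returns its discrete derivative val(i+1)-val(i) in one comprehension. Pre_ keeps the natural domain h >= 1: at h == 0 A raises ValueError, and for h < 0 A either raises IndexError (H < 0) or its all-zero return is an artefact of its degenerate range() loops.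
-- outside the precondition, e.g. on get_1d(5, -2): A returns [0, 0, 0, 0, 0], B returns [-1, 2, -1, 2, -1]; on get_1d(3, 0): A raises ValueError, B raises ZeroDivisionError
import Mathlib
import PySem

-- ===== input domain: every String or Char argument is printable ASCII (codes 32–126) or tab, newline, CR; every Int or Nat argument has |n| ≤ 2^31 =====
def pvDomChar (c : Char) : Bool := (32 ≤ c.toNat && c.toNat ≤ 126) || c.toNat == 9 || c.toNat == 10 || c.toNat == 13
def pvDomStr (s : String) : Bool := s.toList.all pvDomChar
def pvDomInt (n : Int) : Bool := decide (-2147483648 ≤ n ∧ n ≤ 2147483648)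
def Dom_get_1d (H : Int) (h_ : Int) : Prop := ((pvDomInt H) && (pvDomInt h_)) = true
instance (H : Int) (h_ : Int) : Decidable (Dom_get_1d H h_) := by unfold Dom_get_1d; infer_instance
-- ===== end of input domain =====

-- B replaces A's three destructive array passes by a pure pointwise closed-form profile
-- function and its discrete derivative; objective: alternative (see claim.json).


-- ===== PORT A =====
-- 'ret[i] = v' is ported with the total pySetD: under Pre_get_1d (1 ≤ h_) every
-- written index is in range, so pySetD agrees exactly with Python's assignment.
def get_1d (H : Int) (h_ : Int) : List Int :=
  let ret0 := PySem.List.pyRepeat [(0 : Int)] (H + 1)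
  let ret1 := (PySem.List.pyRange 0 h_ 1).foldl (fun ret s =>
      (PySem.List.enumerate (PySem.List.pyRange s H h_)).foldl
        (fun r xi => PySem.List.pySetD r xi.2 (-xi.1)) ret) ret0
  let ret2 := (PySem.List.enumerate (PySem.List.pyRange H 0 (-h_))).foldl
      (fun r xi => PySem.List.pySetD r xi.2 (xi.1 + 1)) ret1
  (ret2.zip (PySem.List.slice ret2 (some 1) none)).map (fun p => p.2 - p.1)

-- ===== PORT B =====
-- the helper 'val' of Source B
def get_1d_val (H : Int) (h_ : Int) (i : Int) : Int :=
  if 0 < i ∧ PySem.Int.mod (H - i) h_ = 0 then PySem.Int.floordiv (H - i) h_ + 1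
  else if i < H then -(PySem.Int.floordiv i h_) else 0

def get_1d_alt (H : Int) (h_ : Int) : List Int :=
  (PySem.List.pyRange 0 H 1).map (fun i => get_1d_val H h_ (i + 1) - get_1d_val H h_ i)

-- ===== PRECONDITION & SPEC =====
-- Pre_ keeps the natural domain h ≥ 1 only (h is a positive step): A raises ValueError at
-- h = 0 and IndexError when h < 0 ∧ H < 0, and for h < 0 ∧ H ≥ 0 (malformed negative step)
-- A's all-zero return is an artefact of its loops being degenerate there.
def Pre_get_1d (H : Int) (h_ : Int) : Prop := 1 ≤ h_
instance (H : Int) (h_ : Int) : Decidable (Pre_get_1d H h_) := by unfold Pre_get_1d; infer_instance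
def pvWitness_get_1d : Int × Int := (7, 3)
def Spec_get_1d (H : Int) (h_ : Int) (out : List Int) : Prop := out = get_1d_alt H h_
instance (H : Int) (h_ : Int) (out : List Int) : Decidable (Spec_get_1d H h_ out) := by unfold Spec_get_1d; infer_instance

-- ===== CLAIM (what is proved, stated in full; the proofs are below) =====
def Claim_equal_get_1d : Prop := ∀ (H : Int) (h_ : Int), Dom_get_1d H h_ → Pre_get_1d H h_ → Spec_get_1d H h_ (get_1d H h_)

-- ===== LEMMAS AND PROOFS =====

-- the inner fill over the arithmetic progression s, s+h, ..., characterised pointwise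
theorem pv_inner_aux (h s : Int) (hh : 0 < h) (hs : 0 ≤ s) (K : Nat) (r : List Int)
    (hK : ∀ k : Nat, k < K → s + h * k < (r.length : Int)) (j : Nat) :
    ((PySem.List.enumerate ((List.range K).map (fun k : Nat => s + h * (k : Int)))).foldl
        (fun r xi => PySem.List.pySetD r xi.2 (-xi.1)) r)[j]? =
      if s ≤ (j : Int) ∧ (j : Int) < s + h * K ∧ h ∣ ((j : Int) - s)
      then some (-(((j : Int) - s) / h)) else r[j]? := by
  induction K with
  | zero =>
    rw [if_neg (by intro ⟨h1, h2, _⟩; simp at h2; omega)]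
    rfl
  | succ K ih =>
    rw [List.range_succ, List.map_append, PySem.List.enumerate_append, List.foldl_append]
    simp only [List.map_cons, List.map_nil, List.length_map, List.length_range]
    have hKr : s + h * K < (r.length : Int) := hK K (by omega)
    have hpos : (0:Int) ≤ s + h * K := by positivity
    have hone : PySem.List.enumerate [s + h * (K : Int)] ((0:Int) + (K : Nat)) =
        [(((K : Nat) : Int), s + h * (K : Int))] := by
      simp [PySem.List.enumerate]
    rw [hone]
    simp only [List.foldl_cons, List.foldl_nil]
    rw [PySem.List.pySetD_of_nonneg _ _ (by positivity)]
    have hprevlen : ∀ (L : List (Int × Int)) (r : List Int),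
        (L.foldl (fun r xi => PySem.List.pySetD r xi.2 (-xi.1)) r).length = r.length := by
      intro L
      induction L with
      | nil => intro r; rfl
      | cons p L ihL => intro r; simp [List.foldl_cons, ihL, PySem.List.length_pySetD]
    have hlt : (s + h * (K:Int)).toNat < (List.foldl (fun r xi => PySem.List.pySetD r xi.2 (-xi.1)) r
        (PySem.List.enumerate (List.map (fun k : Nat => s + h * (k:Int)) (List.range K)))).length := by
      rw [hprevlen]; omega
    rw [List.getElem?_set]
    by_cases hj : (s + h * K).toNat = j
    · -- written position
      have hjv : (j : Int) = s + h * K := by rw [← hj, Int.toNat_of_nonneg hpos]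
      have hdivK : ((j : Int) - s) / h = K := by
        rw [hjv, show s + h * (K:Int) - s = h * K by ring, Int.mul_ediv_cancel_left _ (by omega)]
      have hcond : s ≤ (j : Int) ∧ (j : Int) < s + h * ((K + 1 : Nat) : Int) ∧ h ∣ ((j : Int) - s) :=
        ⟨by rw [hjv]; nlinarith [sq_nonneg h], by push_cast; nlinarith, by rw [hjv]; simp⟩
      rw [if_pos hj, if_pos hlt, if_pos hcond, hdivK]
    · rw [if_neg hj, ih (fun k hk => hK k (by omega))]
      by_cases hc : s ≤ (j : Int) ∧ (j : Int) < s + h * K ∧ h ∣ ((j : Int) - s)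
      · rw [if_pos hc, if_pos ⟨hc.1, by push_cast; nlinarith [hc.2.1], hc.2.2⟩]
      · rw [if_neg hc]
        by_cases hc2 : s ≤ (j : Int) ∧ (j : Int) < s + h * ((K + 1 : Nat) : Int) ∧ h ∣ ((j : Int) - s)
        · exfalso
          obtain ⟨m, hm⟩ := hc2.2.2
          have hm0 : 0 ≤ m := by nlinarith [hc2.1]
          have hmlt : m < (K + 1 : Int) := by
            have := hc2.2.1
            push_cast at this
            nlinarith
          have hmK : m ≠ K := by
            intro hmk
            apply hj
            rw [hmk] at hm
            have hje : (j : Int) = s + h * K := by linarith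
            rw [← hje]
            simp
          have hmle : m ≤ (K : Int) - 1 := by omega
          have hprod : h * m ≤ h * ((K : Int) - 1) :=
            mul_le_mul_of_nonneg_left hmle hh.le
          have hx : h * ((K : Int) - 1) = h * K - h := by ring
          exact hc ⟨hc2.1, by linarith, hc2.2.2⟩
        · rw [if_neg hc2]

-- the inner fill in port-A form: residue class s of [0, H) gets -(j // h)
theorem pv_inner_fill (H h s : Int) (hh : 0 < h) (hs0 : 0 ≤ s) (hsh : s < h)
    (r : List Int) (hr : r.length = (H + 1).toNat) (hH : 0 ≤ H) (j : Nat) :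
    ((PySem.List.enumerate (PySem.List.pyRange s H h)).foldl
        (fun r xi => PySem.List.pySetD r xi.2 (-xi.1)) r)[j]? =
      if (j : Int) < H ∧ PySem.Int.mod (j : Int) h = s
      then some (-(PySem.Int.floordiv (j : Int) h)) else r[j]? := by
  rw [PySem.List.pyRange_of_pos s H hh]
  by_cases hsH : s < H
  · simp only [if_pos hsH]
    have hq0 : 0 ≤ (H - s + h - 1) / h := Int.ediv_nonneg (by omega) hh.le
    have hqc : (((H - s + h - 1) / h).toNat : Int) = (H - s + h - 1) / h := Int.toNat_of_nonneg hq0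
    have hql : h * ((H - s + h - 1) / h) ≤ H - s + h - 1 := by
      have := Int.ediv_mul_le (H - s + h - 1) (by omega : h ≠ 0)
      linarith
    have hqu : H - s ≤ h * ((H - s + h - 1) / h) := by
      have := Int.lt_ediv_add_one_mul_self (H - s + h - 1) hh
      nlinarith
    rw [pv_inner_aux h s hh hs0 _ r (by
      intro k hk
      have hk1 : (k : Int) ≤ (H - s + h - 1) / h - 1 := by omega
      have := mul_le_mul_of_nonneg_left hk1 hh.le
      have hlen : ((H + 1).toNat : Int) = H + 1 := by omega
      rw [hr, hlen]
      nlinarith) j]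
    by_cases hc : s ≤ (j : Int) ∧ (j : Int) < s + h * (((H - s + h - 1) / h).toNat : Int) ∧ h ∣ ((j : Int) - s)
    · obtain ⟨m, hm⟩ := hc.2.2
      have hm0 : 0 ≤ m := by nlinarith [hc.1]
      have hjH : (j : Int) < H := by
        have h2 := hc.2.1
        rw [hqc] at h2
        have hmq : m < (H - s + h - 1) / h := by nlinarith
        have hmq1 : m ≤ (H - s + h - 1) / h - 1 := by omega
        have := mul_le_mul_of_nonneg_left hmq1 hh.le
        nlinarith
      have hmod : PySem.Int.mod (j : Int) h = s := by
        rw [PySem.Int.mod_eq_emod_of_pos hh, show (j : Int) = s + h * m by omega,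
          Int.add_mul_emod_self_left, Int.emod_eq_of_lt hs0 hsh]
      have hdiv : ((j : Int) - s) / h = PySem.Int.floordiv (j : Int) h := by
        rw [PySem.Int.floordiv_eq_ediv_of_pos hh, hm, Int.mul_ediv_cancel_left _ (by omega)]
        rw [show (j : Int) = s + h * m by omega, Int.add_mul_ediv_left _ _ (by omega : h ≠ 0),
          Int.ediv_eq_zero_of_lt hs0 hsh]
        ring
      rw [if_pos hc, if_pos ⟨hjH, hmod⟩, hdiv]
    · rw [if_neg hc, if_neg]
      intro ⟨hjH, hmod⟩
      apply hc
      rw [PySem.Int.mod_eq_emod_of_pos hh] at hmod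
      have hdvd : h ∣ ((j : Int) - s) := by
        have := Int.emod_def (j : Int) h
        exact ⟨(j : Int) / h, by omega⟩
      obtain ⟨m, hm⟩ := hdvd
      have hm0 : 0 ≤ m := by
        by_contra hneg
        push Not at hneg
        have : h * m ≤ -h := by nlinarith
        omega
      refine ⟨by nlinarith, ?_, ⟨m, hm⟩⟩
      rw [hqc]
      nlinarith
  · simp only [if_neg hsH, List.range_zero, List.map_nil]
    rw [show PySem.List.enumerate ([] : List Int) = [] from rfl]
    simp only [List.foldl_nil]
    rw [if_neg]
    intro ⟨hjH, hmod⟩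
    rw [PySem.Int.mod_eq_emod_of_pos hh] at hmod
    have : s ≤ (j : Int) := by
      have h1 : (j : Int) % h = (j : Int) - h * ((j : Int) / h) := by rw [Int.emod_def]
      have h2 : 0 ≤ (j : Int) / h := Int.ediv_nonneg (by omega) hh.le
      nlinarith
    omega

-- a fold of pySetD writes preserves the length
theorem pv_len_fold (f : Int × Int → Int) (L : List (Int × Int)) (r : List Int) :
    (L.foldl (fun r xi => PySem.List.pySetD r xi.2 (f xi)) r).length = r.length := by
  induction L generalizing r with
  | nil => rfl
  | cons p L ih => simp [List.foldl_cons, ih, PySem.List.length_pySetD]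

theorem pv_len_outer (H h : Int) (S : Nat) :
    (((List.range S).map (fun k : Nat => (k : Int))).foldl
        (fun ret s =>
          (PySem.List.enumerate (PySem.List.pyRange s H h)).foldl
            (fun r xi => PySem.List.pySetD r xi.2 (-xi.1)) ret)
        (List.replicate (H + 1).toNat (0 : Int))).length = (H + 1).toNat := by
  induction S with
  | zero => simp
  | succ S ih =>
    rw [List.range_succ, List.map_append, List.foldl_append]
    simp only [List.map_cons, List.map_nil, List.foldl_cons, List.foldl_nil]
    rw [pv_len_fold (fun xi => -xi.1)]
    exact ih

-- the outer loop over residues 0 .. S-1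
theorem pv_outer_aux (H h : Int) (hh : 0 < h) (hH : 0 ≤ H) (S : Nat) (hS : (S : Int) ≤ h) (j : Nat) :
    (((List.range S).map (fun k : Nat => (k : Int))).foldl
        (fun ret s =>
          (PySem.List.enumerate (PySem.List.pyRange s H h)).foldl
            (fun r xi => PySem.List.pySetD r xi.2 (-xi.1)) ret)
        (List.replicate (H + 1).toNat (0 : Int)))[j]? =
      if j < (H + 1).toNat then
        (if (j : Int) < H ∧ PySem.Int.mod (j : Int) h < (S : Int)
         then some (-(PySem.Int.floordiv (j : Int) h)) else some 0)
      else none := by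
  have hM0 : 0 ≤ PySem.Int.mod (j : Int) h := PySem.Int.mod_nonneg _ hh
  induction S with
  | zero =>
    simp only [List.range_zero, List.map_nil, List.foldl_nil, List.getElem?_replicate]
    by_cases hj : j < (H + 1).toNat
    · rw [if_pos hj, if_pos hj, if_neg (by push Not; intro _; omega)]
    · rw [if_neg hj, if_neg hj]
  | succ S ih =>
    rw [List.range_succ, List.map_append, List.foldl_append]
    simp only [List.map_cons, List.map_nil, List.foldl_cons, List.foldl_nil]
    rw [pv_inner_fill H h (S : Int) hh (by positivity) (by omega)
        _ (pv_len_outer H h S) hH j]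
    rw [ih (by omega)]
    by_cases hj : j < (H + 1).toNat
    · rw [if_pos hj, if_pos hj]
      by_cases hc : (j : Int) < H ∧ PySem.Int.mod (j : Int) h = (S : Int)
      · rw [if_pos hc, if_pos ⟨hc.1, by rw [hc.2]; push_cast; omega⟩]
      · rw [if_neg hc]
        by_cases hc2 : (j : Int) < H ∧ PySem.Int.mod (j : Int) h < ((S + 1 : Nat) : Int)
        · have hlt : PySem.Int.mod (j : Int) h < (S : Int) := by
            have h2 := hc2.2
            rcases lt_or_eq_of_le (by omega : PySem.Int.mod (j : Int) h ≤ (S : Int)) with hlt | heq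
            · exact hlt
            · exact absurd ⟨hc2.1, heq⟩ hc
          rw [if_pos hc2, if_pos ⟨hc2.1, hlt⟩]
        · rw [if_neg hc2, if_neg (by push Not at hc2 ⊢; intro hjH; have := hc2 hjH; omega)]
    · rw [if_neg hj, if_neg hj, if_neg (by push Not; intro hjH; omega)]

-- A's filled array after the first double loop, pointwise (h ≥ 1, H ≥ 0)
theorem pv_fill_getElem (H h : Int) (hh : 1 ≤ h) (hH : 0 ≤ H) (j : Nat) :
    ((PySem.List.pyRange 0 h 1).foldl (fun ret s =>
        (PySem.List.enumerate (PySem.List.pyRange s H h)).foldl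
          (fun r xi => PySem.List.pySetD r xi.2 (-xi.1)) ret)
      (PySem.List.pyRepeat [(0 : Int)] (H + 1)))[j]? =
      if j < (H + 1).toNat then
        (if (j : Int) < H then some (-(PySem.Int.floordiv (j : Int) h)) else some 0)
      else none := by
  have hrange : PySem.List.pyRange 0 h 1 = (List.range h.toNat).map (fun k : Nat => (k : Int)) := by
    rw [PySem.List.pyRange_one]
    simp
  rw [hrange, PySem.List.pyRepeat_singleton]
  rw [pv_outer_aux H h (by omega) hH h.toNat (by omega) j]
  by_cases hj : j < (H + 1).toNat
  · rw [if_pos hj, if_pos hj]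
    by_cases hjH : (j : Int) < H
    · have hc2 : PySem.Int.mod (j : Int) h < ((h.toNat : Int)) := by
        rw [show ((h.toNat : Int)) = h by omega]
        exact PySem.Int.mod_lt _ (by omega)
      rw [if_pos ⟨hjH, hc2⟩, if_pos hjH]
    · rw [if_neg (by intro ⟨h1, _⟩; exact hjH h1), if_neg hjH]
  · rw [if_neg hj, if_neg hj]

-- range(H, 0, -h) explicitly, for h > 0
theorem pv_pyRange_neg (H h : Int) (hh : 0 < h) :
    PySem.List.pyRange H 0 (-h) =
      (List.range (if 0 < H then ((H + h - 1) / h).toNat else 0)).map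
        (fun k : Nat => H - h * (k : Int)) := by
  unfold PySem.List.pyRange
  rw [if_neg (show ¬ (-h = 0) by omega)]
  rw [if_neg (show ¬ (0:Int) < -h by omega)]
  simp only [neg_neg, sub_zero]
  by_cases hH : 0 < H
  · rw [if_pos hH]
    exact List.map_congr_left (fun k _ => by ring)
  · rw [if_neg hH]
    simp

-- the overwrite fold over the decreasing progression H, H-h, ..., pointwise
theorem pv_over_aux (h H : Int) (hh : 0 < h) (K : Nat) (r : List Int)
    (hK : ∀ k : Nat, k < K → 0 ≤ H - h * k ∧ H - h * k < (r.length : Int)) (j : Nat) :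
    ((PySem.List.enumerate ((List.range K).map (fun k : Nat => H - h * (k : Int)))).foldl
        (fun r xi => PySem.List.pySetD r xi.2 (xi.1 + 1)) r)[j]? =
      if H - h * K < (j : Int) ∧ (j : Int) ≤ H ∧ h ∣ (H - (j : Int))
      then some ((H - (j : Int)) / h + 1) else r[j]? := by
  induction K with
  | zero =>
    rw [if_neg (by intro ⟨h1, h2, _⟩; simp at h1; omega)]
    rfl
  | succ K ih =>
    rw [List.range_succ, List.map_append, PySem.List.enumerate_append, List.foldl_append]
    simp only [List.map_cons, List.map_nil, List.length_map, List.length_range]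
    obtain ⟨hge, hlt⟩ := hK K (by omega)
    have hone : PySem.List.enumerate [H - h * (K : Int)] ((0:Int) + (K : Nat)) =
        [(((K : Nat) : Int), H - h * (K : Int))] := by
      simp [PySem.List.enumerate]
    rw [hone]
    simp only [List.foldl_cons, List.foldl_nil]
    rw [PySem.List.pySetD_of_nonneg _ _ hge]
    have hlen : (List.foldl (fun r xi => PySem.List.pySetD r xi.2 (xi.1 + 1)) r
        (PySem.List.enumerate (List.map (fun k : Nat => H - h * (k:Int)) (List.range K)))).length
        = r.length := pv_len_fold (fun xi => xi.1 + 1) _ r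
    have hltl : (H - h * (K:Int)).toNat < (List.foldl (fun r xi => PySem.List.pySetD r xi.2 (xi.1 + 1)) r
        (PySem.List.enumerate (List.map (fun k : Nat => H - h * (k:Int)) (List.range K)))).length := by
      rw [hlen]; omega
    rw [List.getElem?_set]
    by_cases hj : (H - h * K).toNat = j
    · have hjv : (j : Int) = H - h * K := by rw [← hj, Int.toNat_of_nonneg hge]
      have hdivK : (H - (j : Int)) / h = K := by
        rw [hjv, show H - (H - h * (K:Int)) = h * K by ring, Int.mul_ediv_cancel_left _ (by omega)]
      have hcond : H - h * ((K + 1 : Nat) : Int) < (j : Int) ∧ (j : Int) ≤ H ∧ h ∣ (H - (j : Int)) :=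
        ⟨by push_cast; nlinarith, by rw [hjv]; nlinarith [sq_nonneg h], by rw [hjv]; exact ⟨K, by ring⟩⟩
      rw [if_pos hj, if_pos hltl, if_pos hcond, hdivK]
    · rw [if_neg hj, ih (fun k hk => hK k (by omega))]
      by_cases hc : H - h * K < (j : Int) ∧ (j : Int) ≤ H ∧ h ∣ (H - (j : Int))
      · rw [if_pos hc, if_pos ⟨by push_cast; nlinarith [hc.1], hc.2.1, hc.2.2⟩]
      · rw [if_neg hc]
        by_cases hc2 : H - h * ((K + 1 : Nat) : Int) < (j : Int) ∧ (j : Int) ≤ H ∧ h ∣ (H - (j : Int))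
        · exfalso
          obtain ⟨m, hm⟩ := hc2.2.2
          have hm0 : 0 ≤ m := by nlinarith [hc2.2.1]
          have hmlt : m < (K + 1 : Int) := by
            have := hc2.1
            push_cast at this
            nlinarith
          have hmK : m ≠ K := by
            intro hmk
            apply hj
            rw [hmk] at hm
            have hje : (j : Int) = H - h * K := by linarith
            rw [← hje]
            simp
          have hmle : m ≤ (K : Int) - 1 := by omega
          have hprod : h * m ≤ h * ((K : Int) - 1) :=
            mul_le_mul_of_nonneg_left hmle hh.le
          exact hc ⟨by nlinarith, hc2.2.1, hc2.2.2⟩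
        · rw [if_neg hc2]

-- the overwrite fold in port-A form
theorem pv_over_fill (H h : Int) (hh : 0 < h) (hH : 0 ≤ H) (r : List Int)
    (hr : r.length = (H + 1).toNat) (j : Nat) :
    ((PySem.List.enumerate (PySem.List.pyRange H 0 (-h))).foldl
        (fun r xi => PySem.List.pySetD r xi.2 (xi.1 + 1)) r)[j]? =
      if 0 < (j : Int) ∧ (j : Int) ≤ H ∧ h ∣ (H - (j : Int))
      then some ((H - (j : Int)) / h + 1) else r[j]? := by
  rw [pv_pyRange_neg H h hh]
  by_cases hH0 : 0 < H
  · rw [if_pos hH0]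
    have hq0 : 0 ≤ (H + h - 1) / h := Int.ediv_nonneg (by omega) hh.le
    have hqc : (((H + h - 1) / h).toNat : Int) = (H + h - 1) / h := Int.toNat_of_nonneg hq0
    have hql : h * ((H + h - 1) / h) ≤ H + h - 1 := by
      have := Int.ediv_mul_le (H + h - 1) (by omega : h ≠ 0)
      linarith
    have hqu : H ≤ h * ((H + h - 1) / h) := by
      have := Int.lt_ediv_add_one_mul_self (H + h - 1) hh
      nlinarith
    rw [pv_over_aux h H hh _ r (by
      intro k hk
      have hk1 : (k : Int) ≤ (H + h - 1) / h - 1 := by omega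
      have := mul_le_mul_of_nonneg_left hk1 hh.le
      have hlen : ((H + 1).toNat : Int) = H + 1 := by omega
      constructor
      · nlinarith
      · rw [hr, hlen]; nlinarith [mul_nonneg hh.le (Nat.cast_nonneg k : (0:Int) ≤ k)]) j]
    by_cases hc : 0 < (j : Int) ∧ (j : Int) ≤ H ∧ h ∣ (H - (j : Int))
    · rw [if_pos hc, if_pos]
      refine ⟨?_, hc.2.1, hc.2.2⟩
      rw [hqc]
      omega
    · rw [if_neg hc, if_neg]
      intro ⟨h1, h2, h3⟩
      apply hc
      refine ⟨?_, h2, h3⟩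
      rw [hqc] at h1
      by_contra hj0
      have hj0' : (j : Int) = 0 := by omega
      rw [hj0', sub_zero] at h3
      obtain ⟨m, hm⟩ := h3
      have hqm : (H + h - 1) / h = m := by
        rw [hm, show h * m + h - 1 = (h - 1) + m * h by ring,
          Int.add_mul_ediv_right _ _ (by omega : h ≠ 0),
          Int.ediv_eq_zero_of_lt (by omega) (by omega), zero_add]
      rw [hj0', hqm, hm] at h1
      omega
  · rw [if_neg hH0]
    simp only [List.range_zero, List.map_nil]
    rw [show PySem.List.enumerate ([] : List Int) = [] from rfl]
    simp only [List.foldl_nil]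
    rw [if_neg (by intro ⟨h1, h2, _⟩; omega)]

-- ret2 (A's array after both passes) is exactly B's profile, as a mapped range
theorem pv_ret2 (H h : Int) (hh : 1 ≤ h) (hH : 0 ≤ H) :
    (PySem.List.enumerate (PySem.List.pyRange H 0 (-h))).foldl
        (fun r xi => PySem.List.pySetD r xi.2 (xi.1 + 1))
        ((PySem.List.pyRange 0 h 1).foldl (fun ret s =>
            (PySem.List.enumerate (PySem.List.pyRange s H h)).foldl
              (fun r xi => PySem.List.pySetD r xi.2 (-xi.1)) ret)
          (PySem.List.pyRepeat [(0 : Int)] (H + 1))) =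
      (List.range (H + 1).toNat).map (fun j : Nat => get_1d_val H h (j : Int)) := by
  have hlen1 : ((PySem.List.pyRange 0 h 1).foldl (fun ret s =>
      (PySem.List.enumerate (PySem.List.pyRange s H h)).foldl
        (fun r xi => PySem.List.pySetD r xi.2 (-xi.1)) ret)
      (PySem.List.pyRepeat [(0 : Int)] (H + 1))).length = (H + 1).toNat := by
    have hrange : PySem.List.pyRange 0 h 1 = (List.range h.toNat).map (fun k : Nat => (k : Int)) := by
      rw [PySem.List.pyRange_one]; simp
    rw [hrange, PySem.List.pyRepeat_singleton]
    exact pv_len_outer H h h.toNat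
  apply List.ext_getElem?
  intro j
  rw [pv_over_fill H h (by omega) hH _ hlen1 j, pv_fill_getElem H h hh hH j]
  by_cases hj : j < (H + 1).toNat
  · rw [if_pos hj]
    have hRHS : ((List.range (H + 1).toNat).map (fun j : Nat => get_1d_val H h (j : Int)))[j]? =
        some (get_1d_val H h (j : Int)) := by
      rw [List.getElem?_map, List.getElem?_range hj]
      rfl
    rw [hRHS]
    by_cases hc : 0 < (j : Int) ∧ (j : Int) ≤ H ∧ h ∣ (H - (j : Int))
    · rw [if_pos hc]
      have hmod : PySem.Int.mod (H - (j : Int)) h = 0 := by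
        rw [PySem.Int.mod_eq_emod_of_pos (by omega)]
        exact Int.emod_eq_zero_of_dvd hc.2.2
      have hdiv : PySem.Int.floordiv (H - (j : Int)) h = (H - (j : Int)) / h :=
        PySem.Int.floordiv_eq_ediv_of_pos (by omega)
      rw [show get_1d_val H h (j : Int) =
          PySem.Int.floordiv (H - (j : Int)) h + 1 by
        unfold get_1d_val
        rw [if_pos ⟨hc.1, hmod⟩], hdiv]
    · rw [if_neg hc]
      have hnc : ¬ (0 < (j : Int) ∧ PySem.Int.mod (H - (j : Int)) h = 0) := by
        intro ⟨h1, h2⟩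
        apply hc
        refine ⟨h1, by omega, ?_⟩
        rw [PySem.Int.mod_eq_emod_of_pos (by omega)] at h2
        exact Int.dvd_of_emod_eq_zero h2
      by_cases hjH : (j : Int) < H
      · rw [if_pos hjH]
        rw [show get_1d_val H h (j : Int) = -(PySem.Int.floordiv (j : Int) h) by
          unfold get_1d_val
          rw [if_neg hnc, if_pos hjH]]
      · rw [if_neg hjH]
        rw [show get_1d_val H h (j : Int) = 0 by
          unfold get_1d_val
          rw [if_neg hnc, if_neg hjH]]
  · rw [if_neg hj]
    have hnc : ¬ (0 < (j : Int) ∧ (j : Int) ≤ H ∧ h ∣ (H - (j : Int))) := by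
      intro ⟨_, h2, _⟩; omega
    rw [if_neg hnc]
    symm
    rw [List.getElem?_eq_none_iff]
    simp
    omega

-- discrete derivative of a mapped range: zip-with-tail differencing = pointwise differences
theorem pv_diff (g : Nat → Int) (n : Nat) :
    (((List.range (n + 1)).map g).zip
        (PySem.List.slice ((List.range (n + 1)).map g) (some 1) none)).map (fun p => p.2 - p.1) =
      (List.range n).map (fun k => g (k + 1) - g k) := by
  rw [PySem.List.slice_from_one]
  apply List.ext_getElem
  · simp
  · intro k hk1 hk2
    simp only [List.length_map, List.length_zip, List.length_tail, List.length_range,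
      List.length_map] at hk1
    have hk : k < n := by omega
    simp only [List.getElem_map, List.getElem_zip, List.getElem_tail, List.getElem_range]

theorem pv_main (H h_ : Int) (hpre : 1 ≤ h_) : get_1d H h_ = get_1d_alt H h_ := by
  by_cases hH : 0 ≤ H
  · simp only [get_1d, get_1d_alt]
    rw [pv_ret2 H h_ hpre hH]
    have hsplit : (H + 1).toNat = H.toNat + 1 := by omega
    rw [hsplit, pv_diff (fun j : Nat => get_1d_val H h_ (j : Int)) H.toNat]
    rw [PySem.List.pyRange_one]
    simp only [sub_zero, List.map_map]
    apply List.map_congr_left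
    intro k _
    simp only [Function.comp_apply, zero_add]
    push_cast
    ring_nf
  · push Not at hH
    simp only [get_1d, get_1d_alt]
    have h0 : PySem.List.pyRange H 0 (-h_) = [] := by
      rw [pv_pyRange_neg H h_ (by omega), if_neg (by omega)]
      simp
    rw [h0]
    have h1 : PySem.List.pyRange 0 H 1 = [] := PySem.List.pyRange_one_eq_nil (by omega)
    have h2 : PySem.List.pyRepeat [(0 : Int)] (H + 1) = [] := by
      rw [PySem.List.pyRepeat_singleton, show (H + 1).toNat = 0 by omega, List.replicate_zero]
    rw [h1, h2]
    have h3 : ∀ r : List Int, (PySem.List.pyRange 0 h_ 1).foldl (fun ret s =>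
        (PySem.List.enumerate (PySem.List.pyRange s H h_)).foldl
          (fun r xi => PySem.List.pySetD r xi.2 (-xi.1)) ret) r = r := by
      intro r
      rw [PySem.List.foldl_congr_mem _ _ (fun acc _ => acc) r ?_]
      · exact List.foldl_fixed _
      · intro acc s hs
        have hs0 : 0 ≤ s := (PySem.List.mem_pyRange_one.mp hs).1
        have : PySem.List.pyRange s H h_ = [] := by
          rw [PySem.List.pyRange_of_pos s H (by omega)]
          rw [if_neg (by omega)]
          simp
        rw [this]
        rfl
    rw [h3]
    simp [PySem.List.enumerate, PySem.List.slice]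

-- ===== VERDICT (by name: the statement is the Claim_ definition above) =====
theorem get_1d_spec : Claim_equal_get_1d := by
  intro H h_ _ hpre
  exact pv_main H h_ hpre
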